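-- pv_equiv track=rewrite | github.com/amp-rh/agent-tools | src/agent_tools/code/refactor.py | _find_same_name_functions
-- ===== SOURCE A (Python) =====
-- from collections import defaultdict
--
-- def _find_same_name_functions(functions: list[dict]) -> dict[str, list[dict]]:
--     """Find functions with the same name in different files."""
--     by_name = defaultdict(list)
--     for func in functions:
--         by_name[func["name"]].append(func)
--
--     same_name = {}
--     for name, funcs in by_name.items():
--         files = set(f["file"] for f in funcs)
--         if len(files) > 1:
--             same_name[name] = funcs
--
--     return same_name
-- ===== SOURCE B (Python) =====
-- def _find_same_name_functions(functions):
--     """Find functions with the same name in different files."""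
--     # Repeated partitioning: take the first remaining function's name, split the
--     # remaining list into that name's group and the rest, and keep the group iff
--     # it spans more than one file.  No grouping dict is ever built.
--     same_name = {}
--     rest = functions
--     while rest:
--         name = rest[0]["name"]
--         group = [f for f in rest if f["name"] == name]
--         rest = [f for f in rest if f["name"] != name]
--         if len({f["file"] for f in group}) > 1:
--             same_name[name] = group
--     return same_name
-- ===== Notes on version B (the rewrite author's own statement) =====
-- stated objective: alternative
-- what changed: A hash-buckets every function by name in one pass and then filters the buckets; B uses no grouping dict at all: it repeatedly partitions the remaining list around the first element's name, emitting each name's group (in first-occurrence order) when its files span more than one file.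
import Mathlib
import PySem

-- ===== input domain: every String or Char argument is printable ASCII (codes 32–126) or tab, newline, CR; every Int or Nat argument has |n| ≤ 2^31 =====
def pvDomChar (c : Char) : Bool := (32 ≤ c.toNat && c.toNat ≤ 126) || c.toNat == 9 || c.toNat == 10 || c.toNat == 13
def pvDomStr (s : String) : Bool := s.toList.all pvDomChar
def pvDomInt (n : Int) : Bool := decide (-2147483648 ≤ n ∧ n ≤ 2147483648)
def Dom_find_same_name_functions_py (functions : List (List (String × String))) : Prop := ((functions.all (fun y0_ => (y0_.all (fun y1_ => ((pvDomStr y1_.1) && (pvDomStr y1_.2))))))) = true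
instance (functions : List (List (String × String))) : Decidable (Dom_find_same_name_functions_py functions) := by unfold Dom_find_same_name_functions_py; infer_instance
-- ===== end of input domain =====

-- B drops A's grouping dict entirely: it repeatedly partitions the remaining list around the
-- first element's name, emitting each qualifying group in first-occurrence order (alternative
-- decomposition, same return value).

-- func["key"] on a dict ported as an association list: first match (Pre_ guarantees the key exists).
def pvGetS (f : List (String × String)) (k : String) : String :=
  ((PySem.Dict.mk f).get? k).getD ""

-- ===== PORT A =====
def find_same_name_functions_py (functions : List (List (String × String))) : List (String × List (List (String × String))) :=
  let by_name := functions.foldl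
    (fun d func => d.modify (pvGetS func "name") [] (· ++ [func])) PySem.Dict.empty
  let same_name := by_name.items.foldl
    (fun acc p =>
      let files : PySem.Set String := PySem.Set.ofList (p.2.map (fun f => pvGetS f "file"))
      if files.length > 1 then acc.insert p.1 p.2 else acc)
    PySem.Dict.empty
  same_name.items

-- ===== PORT B =====
-- the while loop of Source B: partition 'rest' around its head's name, conditionally record the group
def pvAltLoop (rest : List (List (String × String)))
    (same_name : PySem.Dict String (List (List (String × String)))) :
    PySem.Dict String (List (List (String × String))) :=
  match rest with
  | [] => same_name
  | f :: t =>
    let name := pvGetS f "name"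
    let group := (f :: t).filter (fun g => pvGetS g "name" == name)
    let rest' := (f :: t).filter (fun g => !(pvGetS g "name" == name))
    pvAltLoop rest'
      (if (PySem.Set.ofList (group.map (fun g => pvGetS g "file"))).length > 1
       then same_name.insert name group else same_name)
termination_by rest.length
decreasing_by
  simp only [List.filter_cons, beq_self_eq_true, Bool.not_true, if_neg, Bool.false_eq_true,
    not_false_iff, List.length_cons]
  exact Nat.lt_succ_of_le (List.length_filter_le _ _)

def find_same_name_functions_py_alt (functions : List (List (String × String))) : List (String × List (List (String × String))) :=
  (pvAltLoop functions PySem.Dict.empty).items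

-- ===== PRECONDITION & SPEC =====
-- Pre_ excludes exactly the inputs where a function dict lacks a "name" or "file" key, on which
-- the Python A raises KeyError.
def Pre_find_same_name_functions_py (functions : List (List (String × String))) : Prop :=
  ∀ f ∈ functions, ((PySem.Dict.mk f).contains "name" = true) ∧ ((PySem.Dict.mk f).contains "file" = true)
instance (functions : List (List (String × String))) : Decidable (Pre_find_same_name_functions_py functions) := by unfold Pre_find_same_name_functions_py; infer_instance

def pvWitness_find_same_name_functions_py : (List (List (String × String))) :=
  [[("name", "f"), ("file", "a.py")], [("name", "f"), ("file", "b.py")], [("name", "g"), ("file", "a.py")]]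

def Spec_find_same_name_functions_py (functions : List (List (String × String))) (out : List (String × List (List (String × String)))) : Prop := out = find_same_name_functions_py_alt functions
instance (functions : List (List (String × String))) (out : List (String × List (List (String × String)))) : Decidable (Spec_find_same_name_functions_py functions out) := by unfold Spec_find_same_name_functions_py; infer_instance

-- ===== CLAIM (what is proved, stated in full; the proofs are below) =====
def Claim_equal_find_same_name_functions_py : Prop := ∀ (functions : List (List (String × String))), Dom_find_same_name_functions_py functions → Pre_find_same_name_functions_py functions → Spec_find_same_name_functions_py functions (find_same_name_functions_py functions)

-- ===== LEMMAS AND PROOFS =====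

-- the common target both sides are reduced to: the distinct names in first-occurrence order,
-- kept when their bucket spans >1 file, each paired with its bucket
def pvGoal (l : List (List (String × String))) : List (String × List (List (String × String))) :=
  ((PySem.Set.ofList (l.map (fun f => pvGetS f "name"))).filter
      (fun n => decide ((PySem.Set.ofList
        ((l.filter (fun f => pvGetS f "name" == n)).map (fun f => pvGetS f "file"))).length > 1))).map
    (fun n => (n, l.filter (fun f => pvGetS f "name" == n)))

-- A's grouping fold characterised: items = distinct names (first-occurrence order) with buckets
lemma group_items (l : List (List (String × String))) :
    (l.foldl (fun d func => d.modify (pvGetS func "name") [] (· ++ [func])) PySem.Dict.empty).items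
      = (PySem.Set.ofList (l.map (fun f => pvGetS f "name"))).map
          (fun n => (n, l.filter (fun f => pvGetS f "name" == n))) := by
  set D := l.foldl (fun d func => d.modify (pvGetS func "name") [] (· ++ [func])) PySem.Dict.empty with hD
  have hk : D.keys = PySem.Set.ofList (l.map (fun f => pvGetS f "name")) := by
    rw [hD, PySem.Dict.keys_foldl_modify_key l (fun f => pvGetS f "name") [] (fun _ x v => v ++ [x])]
    simp [PySem.Set.update_nil_left]
  have hnd : D.keys.Nodup := by rw [hk]; exact PySem.Set.nodup_ofList _
  have hg : ∀ n, D.getD n [] = l.filter (fun f => pvGetS f "name" == n) := by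
    intro n
    have h2 : D = (l.map (fun f => (pvGetS f "name", f))).foldl
        (fun d p => d.modify p.1 [] (· ++ [p.2])) PySem.Dict.empty := by
      rw [hD, List.foldl_map]
    rw [h2, PySem.Dict.getD_foldl_modify_append]
    simp [List.filter_map, Function.comp_def]
  rw [PySem.Dict.items_eq_map_keys D hnd [], hk]
  exact List.map_congr_left (fun n _ => by rw [hg n])

-- A's second loop: conditional insertion of fresh distinct keys = filtering the items list
lemma foldl_insert_if_items {V : Type} (c : String × V → Prop) [DecidablePred c] :
    ∀ (L : List (String × V)) (d : PySem.Dict String V),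
      (∀ p ∈ L, d.contains p.1 = false) → (L.map (·.1)).Nodup →
      (L.foldl (fun acc p => if c p then acc.insert p.1 p.2 else acc) d).items
        = d.items ++ L.filter (fun p => decide (c p)) := by
  intro L
  induction L with
  | nil => intro d _ _; simp
  | cons p L ih =>
    intro d hc hnd
    simp only [List.map_cons, List.nodup_cons] at hnd
    by_cases h : c p
    · have hfresh : d.contains p.1 = false := hc p (List.mem_cons_self)
      simp only [List.foldl_cons, if_pos h]
      rw [ih (d.insert p.1 p.2)
          (fun q hq => by
            rw [PySem.Dict.contains_insert]
            have : q.1 ≠ p.1 := fun he => hnd.1 (he ▸ List.mem_map_of_mem hq)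
            simp [this, hc q (List.mem_cons_of_mem _ hq)])
          hnd.2]
      rw [PySem.Dict.items_insert_of_not_contains d p.2 hfresh]
      simp [h]
    · simp only [List.foldl_cons, if_neg h]
      rw [ih d (fun q hq => hc q (List.mem_cons_of_mem _ hq)) hnd.2]
      simp [h]

-- set(...) commutes with filtering the underlying list
lemma ofList_filter (q : String → Bool) (xs : List String) :
    PySem.Set.ofList (xs.filter q) = (PySem.Set.ofList xs).filter q := by
  induction xs using List.reverseRecOn with
  | nil => simp
  | append_singleton xs x ih =>
    rw [List.filter_append, PySem.Set.ofList_append_singleton, PySem.Set.add_eq_ite]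
    by_cases hq : q x
    · have hx1 : List.filter q [x] = [x] := by simp [hq]
      rw [hx1, PySem.Set.ofList_append_singleton, PySem.Set.add_eq_ite]
      by_cases hm : x ∈ PySem.Set.ofList xs
      · have hmf : x ∈ PySem.Set.ofList (xs.filter q) := by
          rw [PySem.Set.mem_ofList] at hm ⊢; exact List.mem_filter.mpr ⟨hm, hq⟩
        simp [hm, hq, ih]
      · have hmf : x ∉ PySem.Set.ofList (xs.filter q) := by
          rw [PySem.Set.mem_ofList] at hm ⊢
          exact fun h => hm (List.mem_filter.mp h).1
        simp [hm, hq, ih, List.filter_append]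
    · simp only [Bool.not_eq_true] at hq
      have hx0 : List.filter q [x] = [] := by simp [hq]
      rw [hx0, List.append_nil]
      by_cases hm : x ∈ PySem.Set.ofList xs
      · simp [hm, ih]
      · simp [hm, ih, List.filter_append, hq]

-- peeling the first distinct name off set(map name l)
lemma ofList_names_cons (f : List (String × String)) (t : List (List (String × String))) :
    PySem.Set.ofList ((f :: t).map (fun g => pvGetS g "name"))
      = pvGetS f "name" ::
        PySem.Set.ofList
          (((f :: t).filter (fun g => !(pvGetS g "name" == pvGetS f "name"))).map
            (fun g => pvGetS g "name")) := by
  have h1 : (f :: t).filter (fun g => !(pvGetS g "name" == pvGetS f "name"))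
      = t.filter (fun g => !(pvGetS g "name" == pvGetS f "name")) := by
    simp
  have h2 : ((t.filter (fun g => !(pvGetS g "name" == pvGetS f "name"))).map
        (fun g => pvGetS g "name"))
      = (t.map (fun g => pvGetS g "name")).filter (fun y => !(y == pvGetS f "name")) := by
    rw [List.filter_map]
    rfl
  rw [h1, h2, ofList_filter, List.map_cons, PySem.Set.ofList_cons]
  rfl

-- the one-step unrolling of pvGoal along B's partition
lemma pvGoal_cons (f : List (String × String)) (t : List (List (String × String))) :
    pvGoal (f :: t)
      = (if (PySem.Set.ofList
            (((f :: t).filter (fun g => pvGetS g "name" == pvGetS f "name")).map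
              (fun g => pvGetS g "file"))).length > 1
         then [(pvGetS f "name", (f :: t).filter (fun g => pvGetS g "name" == pvGetS f "name"))]
         else [])
        ++ pvGoal ((f :: t).filter (fun g => !(pvGetS g "name" == pvGetS f "name"))) := by
  set name := pvGetS f "name" with hn
  set r' := (f :: t).filter (fun g => !(pvGetS g "name" == name)) with hr
  have hne : ∀ n' ∈ PySem.Set.ofList (r'.map (fun g => pvGetS g "name")), n' ≠ name := by
    intro n' hn' he
    rw [PySem.Set.mem_ofList] at hn'
    obtain ⟨g, hg, hge⟩ := List.mem_map.mp hn'
    have := (List.mem_filter.mp (hr ▸ hg)).2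
    rw [hge, he] at this
    simp at this
  have hfe : ∀ n' ∈ PySem.Set.ofList (r'.map (fun g => pvGetS g "name")),
      (f :: t).filter (fun g => pvGetS g "name" == n') = r'.filter (fun g => pvGetS g "name" == n') := by
    intro n' hn'
    rw [hr, List.filter_filter]
    refine (List.filter_congr (fun g _ => ?_)).symm
    by_cases hb : (pvGetS g "name" == n') = true
    · have : pvGetS g "name" ≠ name := by rw [eq_of_beq hb]; exact hne n' hn'
      simp [hb, this]
    · simp [hb]
  have htail : ((PySem.Set.ofList (r'.map (fun g => pvGetS g "name"))).filter
        (fun n' => decide ((PySem.Set.ofList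
          (((f :: t).filter (fun g => pvGetS g "name" == n')).map (fun g => pvGetS g "file"))).length > 1))).map
        (fun n' => (n', (f :: t).filter (fun g => pvGetS g "name" == n'))) = pvGoal r' := by
    unfold pvGoal
    rw [List.filter_congr (fun n' hn' => by rw [hfe n' hn'])]
    refine List.map_congr_left (fun n' hn' => ?_)
    rw [hfe n' (List.mem_filter.mp hn').1]
  unfold pvGoal
  rw [ofList_names_cons f t, ← hn, ← hr, List.filter_cons]
  by_cases hq : (PySem.Set.ofList
      (((f :: t).filter (fun g => pvGetS g "name" == name)).map (fun g => pvGetS g "file"))).length > 1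
  · simp only [hq, decide_true, if_true, List.map_cons]
    rw [List.cons_append, List.nil_append, htail]
    rfl
  · simp only [hq, decide_false, if_false, List.nil_append]
    exact htail

-- B's loop computes pvGoal (appended after the accumulated items)
lemma altLoop_items (n : Nat) :
    ∀ (l : List (List (String × String))) (d : PySem.Dict String (List (List (String × String)))),
      l.length ≤ n → d.keys.Nodup → (∀ f ∈ l, d.contains (pvGetS f "name") = false) →
      (pvAltLoop l d).items = d.items ++ pvGoal l := by
  induction n with
  | zero =>
    intro l d hl _ _
    have : l = [] := List.eq_nil_of_length_eq_zero (Nat.le_zero.mp hl)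
    subst this
    rw [pvAltLoop]
    simp [pvGoal]
  | succ n ih =>
    intro l d hl hnd hfr
    match l with
    | [] =>
      rw [pvAltLoop]
      simp [pvGoal]
    | f :: t =>
      rw [pvAltLoop]
      set name := pvGetS f "name" with hn
      set grp := (f :: t).filter (fun g => pvGetS g "name" == name) with hg
      set r' := (f :: t).filter (fun g => !(pvGetS g "name" == name)) with hr
      set d' := (if (PySem.Set.ofList (grp.map (fun g => pvGetS g "file"))).length > 1
                 then d.insert name grp else d) with hd'
      have hfr0 : d.contains name = false := hfr f List.mem_cons_self
      have hlen : r'.length ≤ n := by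
        have h1 : r' = t.filter (fun g => !(pvGetS g "name" == name)) := by
          rw [hr, List.filter_cons]
          simp [hn]
        have h2 : r'.length ≤ t.length := by
          rw [h1]; exact List.length_filter_le _ _
        simp only [List.length_cons] at hl
        omega
      have hnd' : d'.keys.Nodup := by
        rw [hd']
        split
        · exact PySem.Dict.nodup_keys_insert d name grp hnd
        · exact hnd
      have hfr' : ∀ g ∈ r', d'.contains (pvGetS g "name") = false := by
        intro g hgm
        have hm := List.mem_filter.mp (hr ▸ hgm)
        have hne : (pvGetS g "name" == name) = false := by
          simpa using hm.2
        have hdc : d.contains (pvGetS g "name") = false := hfr g hm.1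
        rw [hd']
        split
        · rw [PySem.Dict.contains_insert]
          simp [hne, hdc]
        · exact hdc
      rw [ih r' d' hlen hnd' hfr']
      have hdi : d'.items = d.items ++
          (if (PySem.Set.ofList (grp.map (fun g => pvGetS g "file"))).length > 1
           then [(name, grp)] else []) := by
        rw [hd']
        split
        · exact PySem.Dict.items_insert_of_not_contains d grp hfr0
        · simp
      rw [hdi, List.append_assoc, pvGoal_cons f t]

-- ===== VERDICT (by name: the statement is the Claim_ definition above) =====
theorem find_same_name_functions_py_spec : Claim_equal_find_same_name_functions_py := by
  intro l _ _
  unfold Spec_find_same_name_functions_py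
  unfold find_same_name_functions_py find_same_name_functions_py_alt
  simp only []
  rw [group_items]
  rw [foldl_insert_if_items
        (fun p : String × List (List (String × String)) =>
          (PySem.Set.ofList (p.2.map (fun f => pvGetS f "file"))).length > 1)
        _ PySem.Dict.empty
        (fun p _ => PySem.Dict.contains_empty p.1)
        (by
          rw [List.map_map]
          have hid : ((fun p : String × List (List (String × String)) => p.1) ∘
              fun n => (n, List.filter (fun f => pvGetS f "name" == n) l)) = id := rfl
          rw [hid, List.map_id]
          exact PySem.Set.nodup_ofList _)]
  rw [List.filter_map]
  rw [altLoop_items l.length l PySem.Dict.empty le_rfl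
        (PySem.Dict.nodup_keys_empty) (fun f _ => PySem.Dict.contains_empty _)]
  rfl
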